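-- pv_equiv track=rewrite | github.com/PTM-APIRec/PTM-APIRec | utils.py | find_all_locations
-- ===== SOURCE A (Python) =====
-- from typing import List, Tuple
--
-- def find_all_locations(string: str, sub: str) -> Tuple[int, List[int]]:
--     count = string.count(sub)
--     locs = []
--     start = 0
--     for i in range(count):
--         loc = string.find(sub, start)
--         locs.append(loc)
--         start = loc + 1
--     return count, locs
-- ===== SOURCE B (Python) =====
-- from typing import List, Tuple
--
-- def find_all_locations(string: str, sub: str) -> Tuple[int, List[int]]:
--     count = string.count(sub)
--     positions = [i for i in range(len(string) + 1) if string.startswith(sub, i)]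
--     return count, positions[:count]
-- ===== Notes on version B (the rewrite author's own statement) =====
-- stated objective: simpler
-- what changed: Replaces A's stateful repeated string.find loop (run count times, each restarting the substring search from the previous hit + 1) by a single comprehension enumerating all overlapping match starts via string.startswith(sub, i) and slicing it to the non-overlapping count.
import Mathlib
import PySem

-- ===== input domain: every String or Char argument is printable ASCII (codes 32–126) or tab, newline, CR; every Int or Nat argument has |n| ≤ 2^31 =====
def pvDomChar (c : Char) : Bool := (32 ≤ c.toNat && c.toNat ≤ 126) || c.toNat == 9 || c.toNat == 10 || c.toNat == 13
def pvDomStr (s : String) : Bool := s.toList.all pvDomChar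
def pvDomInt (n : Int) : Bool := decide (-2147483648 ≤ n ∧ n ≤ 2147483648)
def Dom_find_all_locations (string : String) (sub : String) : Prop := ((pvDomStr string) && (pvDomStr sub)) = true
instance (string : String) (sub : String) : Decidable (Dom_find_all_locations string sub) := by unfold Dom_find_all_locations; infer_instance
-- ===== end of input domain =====

-- B replaces A's repeated string.find loop by a single filter over all indices
-- (the overlapping match starts) truncated to the non-overlapping count: simpler, one comprehension.

-- ===== PORT A =====
-- the 'for i in range(count)' loop of A: state (locs, start), i unused
def faLoop (string : String) (sub : String) : Nat → List Int → Int → List Int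
  | 0, locs, _ => locs
  | c + 1, locs, start =>
      let loc := PySem.Str.findFrom string sub start none
      faLoop string sub c (locs ++ [loc]) (loc + 1)

def find_all_locations (string : String) (sub : String) : Int × List Int :=
  let count := PySem.Str.count string sub
  ((count : Int), faLoop string sub count [] 0)

-- ===== PORT B =====
def find_all_locations_alt (string : String) (sub : String) : Int × List Int :=
  let count := PySem.Str.count string sub
  -- string.startswith(sub, i) for 0 ≤ i ≤ len(string) is exactly: sub is a prefix of string[i:]
  let positions := (PySem.List.pyRange 0 ((PySem.Str.len string : Int) + 1) 1).filter
      (fun i => PySem.Chars.startswith (string.toList.drop i.toNat) sub.toList)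
  ((count : Int), PySem.List.slice positions none (some (count : Int)))

-- ===== PRECONDITION & SPEC =====
def Spec_find_all_locations (string : String) (sub : String) (out : Int × List Int) : Prop := out = find_all_locations_alt string sub
instance (string : String) (sub : String) (out : Int × List Int) : Decidable (Spec_find_all_locations string sub out) := by unfold Spec_find_all_locations; infer_instance

-- ===== CLAIM (what is proved, stated in full; the proofs are below) =====
def Claim_equal_find_all_locations : Prop := ∀ (string : String) (sub : String), Dom_find_all_locations string sub → Spec_find_all_locations string sub (find_all_locations string sub)

-- ===== LEMMAS AND PROOFS =====

-- all overlapping match start positions of S in L, in increasing order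
def pvPos (L S : List Char) : List Nat :=
  (List.range (L.length + 1)).filter (fun i => S.isPrefixOf (L.drop i))

lemma pvPos_pairwise (L S : List Char) : (pvPos L S).Pairwise (· < ·) :=
  (List.pairwise_lt_range).filter _

lemma mem_pvPos {L S : List Char} {i : Nat} :
    i ∈ pvPos L S ↔ i ≤ L.length ∧ S.isPrefixOf (L.drop i) := by
  simp [pvPos, List.mem_filter, List.mem_range]

-- the count recurrence for the position list
lemma pvPos_length_cons (x : Char) (t S : List Char) :
    (pvPos (x :: t) S).length
      = (if S.isPrefixOf (x :: t) then 1 else 0) + (pvPos t S).length := by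
  simp only [pvPos, List.length_cons]
  rw [List.range_succ_eq_map, List.filter_cons, List.filter_map]
  have hcomp : ((fun i => S.isPrefixOf (List.drop i (x :: t))) ∘ Nat.succ)
      = (fun i => S.isPrefixOf (List.drop i t)) := rfl
  rw [hcomp]
  by_cases h : S.isPrefixOf (x :: t) = true
  · simp [h]
    omega
  · simp [h]

lemma pvPos_length_tail_le (x : Char) (t S : List Char) :
    (pvPos t S).length ≤ (pvPos (x :: t) S).length := by
  rw [pvPos_length_cons]; omega

lemma pvPos_length_drop_le (L S : List Char) (m : Nat) :
    (pvPos (L.drop m) S).length ≤ (pvPos L S).length := by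
  induction L generalizing m with
  | nil => simp
  | cons x t ih =>
      cases m with
      | zero => simp
      | succ m' =>
          calc (pvPos ((x :: t).drop (m' + 1)) S).length
              = (pvPos (t.drop m') S).length := rfl
            _ ≤ (pvPos t S).length := ih m'
            _ ≤ (pvPos (x :: t) S).length := pvPos_length_tail_le x t S

lemma countGo_le (S : List Char) (hS : S ≠ []) :
    ∀ (fuel : Nat) (l : List Char) (acc : Nat),
      PySem.Chars.count.go S fuel l acc ≤ acc + (pvPos l S).length := by
  intro fuel
  induction fuel with
  | zero => intro l acc; simp [PySem.Chars.count.go]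
  | succ f ih =>
      intro l acc
      cases l with
      | nil => simp [PySem.Chars.count.go]
      | cons x t =>
          simp only [PySem.Chars.count.go]
          by_cases h : S.isPrefixOf (x :: t) = true
          · rw [if_pos h]
            have h1 := ih (List.drop S.length (x :: t)) (acc + 1)
            have h2 : (pvPos (List.drop S.length (x :: t)) S).length
                ≤ (pvPos t S).length := by
              obtain ⟨s0, S', rfl⟩ : ∃ s0 S', S = s0 :: S' := by
                cases S with
                | nil => exact absurd rfl hS
                | cons a b => exact ⟨a, b, rfl⟩
              have : List.drop (s0 :: S').length (x :: t) = List.drop S'.length t := rfl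
              rw [this]
              exact pvPos_length_drop_le t _ _
            have h3 := pvPos_length_cons x t S
            rw [h3, if_pos h]
            omega
          · rw [if_neg h]
            have h1 := ih t acc
            have h3 := pvPos_length_cons x t S
            rw [h3, if_neg h]
            omega

lemma count_le_pvPos_length (L S : List Char) :
    PySem.Chars.count L S ≤ (pvPos L S).length := by
  by_cases hS : S = []
  · subst hS
    simp [PySem.Chars.count, pvPos, List.isPrefixOf]
  · rw [PySem.Chars.count]
    have : S.isEmpty = false := by cases S with
      | nil => exact absurd rfl hS
      | cons a b => rfl
    rw [this]
    simpa using countGo_le S hS L.length L 0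

-- on a strictly increasing list, the ≥k filter is 'head, then the ≥(head+1) filter'
lemma filter_ge_cons_of_pairwise {xs : List Nat} (hp : xs.Pairwise (· < ·))
    {k j : Nat} {t : List Nat}
    (h : xs.filter (fun i => decide (k ≤ i)) = j :: t) :
    xs.filter (fun i => decide (j + 1 ≤ i)) = t := by
  induction xs generalizing k with
  | nil => simp at h
  | cons x tl ih =>
      rw [List.pairwise_cons] at hp
      by_cases hk : k ≤ x
      · rw [List.filter_cons_of_pos (by simpa using hk)] at h
        injection h with h1 h2
        subst h1
        rw [List.filter_cons_of_neg (by simp)]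
        have hall : ∀ p ∈ tl, decide (x + 1 ≤ p) = decide (k ≤ p) := by
          intro p hpmem
          have := hp.1 p hpmem
          simp
          omega
        rw [List.filter_congr hall, h2]
      · rw [List.filter_cons_of_neg (by simpa using hk)] at h
        have hj : j ∈ tl.filter (fun i => decide (k ≤ i)) := by rw [h]; simp
        have hxj : x < j := hp.1 j (List.mem_filter.mp hj).1
        rw [List.filter_cons_of_neg (by simp; omega)]
        exact ih hp.2 h

-- A's find-loop lists exactly the first c overlapping match positions from start k
lemma faLoop_spec (string sub : String) :
    ∀ (c k : Nat) (acc : List Int) (rest : List Nat),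
      (pvPos string.toList sub.toList).filter (fun i => decide (k ≤ i)) = rest →
      c ≤ rest.length →
      faLoop string sub c acc (↑k) = acc ++ (rest.take c).map (fun (n : Nat) => (n : Int)) := by
  intro c
  induction c with
  | zero => intro k acc rest _ _; simp [faLoop]
  | succ c ih =>
      intro k acc rest hrest hlen
      cases rest with
      | nil => simp at hlen
      | cons j t =>
          have hjmem : j ∈ pvPos string.toList sub.toList ∧ k ≤ j := by
            have : j ∈ (pvPos string.toList sub.toList).filter (fun i => decide (k ≤ i)) := by
              rw [hrest]; simp
            have h' := List.mem_filter.mp this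
            exact ⟨h'.1, by simpa using h'.2⟩
          have hjle : j ≤ string.toList.length := (mem_pvPos.mp hjmem.1).1
          have hkle : k ≤ string.toList.length := le_trans hjmem.2 hjle
          have hmin : ∀ i ∈ pvPos string.toList sub.toList, k ≤ i → j ≤ i := by
            intro i hi hki
            have : i ∈ (pvPos string.toList sub.toList).filter (fun m => decide (k ≤ m)) :=
              List.mem_filter.mpr ⟨hi, by simpa using hki⟩
            rw [hrest] at this
            rcases List.mem_cons.mp this with h' | hin
            · omega
            · have hpw := (pvPos_pairwise string.toList sub.toList).filter
                  (fun m => decide (k ≤ m))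
              rw [hrest, List.pairwise_cons] at hpw
              exact le_of_lt (hpw.1 i hin)
          -- the find result is j
          have hfind : PySem.Str.findFrom string sub (↑k) none = (↑j : Int) := by
            rw [PySem.Str.findFrom_eq]
            rw [PySem.Chars.findFrom_natCast string.toList sub.toList k hkle]
            set L := string.toList
            set S := sub.toList
            have hprefj : S.isPrefixOf (L.drop j) = true := (mem_pvPos.mp hjmem.1).2
            have hexists : ∃ m, S <+: (L.drop k).drop m := by
              refine ⟨j - k, ?_⟩
              rw [List.drop_drop]
              have heq : k + (j - k) = j := by omega
              rw [heq]
              exact List.isPrefixOf_iff_prefix.mp hprefj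
            have hisin : PySem.Chars.isIn S (L.drop k) = true :=
              (PySem.Chars.exists_prefix_drop_iff_isIn _ _).mp hexists
            have hne : PySem.Chars.find (L.drop k) S ≠ -1 :=
              (PySem.Chars.find_ne_neg_one_iff _ _).mpr ((PySem.Chars.isIn_iff_infix _ _).mp hisin)
            have hnn : 0 ≤ PySem.Chars.find (L.drop k) S :=
              (PySem.Chars.find_nonneg_iff _ _).mpr ((PySem.Chars.isIn_iff_infix _ _).mp hisin)
            rw [if_neg hne]
            set f := PySem.Chars.find (L.drop k) S with hf
            obtain ⟨hpre, hleast⟩ := PySem.Chars.find_spec (s := L.drop k) (sub := S) hnn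
            have hflen : f ≤ (L.drop k).length := PySem.Chars.find_le_length _ _
            have hkf_mem : k + f.toNat ∈ pvPos L S := by
              rw [mem_pvPos]
              constructor
              · have : (L.drop k).length = L.length - k := List.length_drop ..
                omega
              · rw [List.isPrefixOf_iff_prefix]
                rw [List.drop_drop] at hpre
                exact hpre
            have hj_le : j ≤ k + f.toNat := hmin _ hkf_mem (by omega)
            have hle_j : f.toNat ≤ j - k := by
              by_contra hcon
              push Not at hcon
              have : ¬ S <+: (L.drop k).drop (j - k) := hleast (j - k) hcon
              apply this
              rw [List.drop_drop]
              have heq : k + (j - k) = j := by omega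
              rw [heq]
              exact List.isPrefixOf_iff_prefix.mp hprefj
            have hjeq : k + f.toNat = j := by omega
            have : f = (f.toNat : Int) := (Int.toNat_of_nonneg hnn).symm
            rw [this]
            omega
          show faLoop string sub (c + 1) acc (↑k) = _
          rw [faLoop]
          simp only [hfind]
          have hcast : ((j : Int) + 1) = ((j + 1 : Nat) : Int) := by push_cast; ring
          rw [hcast]
          have htail := filter_ge_cons_of_pairwise (pvPos_pairwise string.toList sub.toList) hrest
          rw [ih (j + 1) (acc ++ [(j : Int)]) t htail (by simpa using hlen)]
          simp [List.take_succ_cons]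

-- B's position list is exactly pvPos, cast to Int
lemma alt_positions_eq (string sub : String) :
    (PySem.List.pyRange 0 ((PySem.Str.len string : Int) + 1) 1).filter
        (fun i => PySem.Chars.startswith (string.toList.drop i.toNat) sub.toList)
      = (pvPos string.toList sub.toList).map (fun (n : Nat) => (n : Int)) := by
  have hlen : (PySem.Str.len string : Int) + 1 = ((string.toList.length + 1 : Nat) : Int) := by
    rw [PySem.Str.len_eq]; push_cast; ring
  rw [hlen, PySem.List.pyRange_zero_natCast, List.filter_map]
  unfold pvPos
  refine congrArg (List.map _) ?_
  apply List.filter_congr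
  intro i _
  simp [PySem.Chars.startswith]

-- ===== VERDICT (by name: the statement is the Claim_ definition above) =====
theorem find_all_locations_spec : Claim_equal_find_all_locations := by
  intro string sub _
  unfold Spec_find_all_locations find_all_locations find_all_locations_alt
  simp only []
  have hcount : PySem.Str.count string sub
      = PySem.Chars.count string.toList sub.toList := by
    simp [PySem.Str.count_eq]
  refine Prod.ext rfl ?_
  show faLoop string sub (PySem.Str.count string sub) [] 0
      = PySem.List.slice _ none (some ((PySem.Str.count string sub : Nat) : Int))
  have hfilt : (pvPos string.toList sub.toList).filter (fun i => decide (0 ≤ i))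
      = pvPos string.toList sub.toList := by
    apply List.filter_eq_self.mpr
    intro a _
    simp
  have hle : PySem.Str.count string sub ≤ (pvPos string.toList sub.toList).length := by
    rw [hcount]
    exact count_le_pvPos_length _ _
  have hmain := faLoop_spec string sub (PySem.Str.count string sub) 0 [] _ hfilt hle
  rw [alt_positions_eq, PySem.List.slice_to_natCast, ← List.map_take]
  simp only [List.nil_append, Nat.cast_zero] at hmain
  exact hmain
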